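-- pv_equiv track=rewrite | github.com/hyeon95y/graphtorch | graphtorch/core/utils.py | sort_node_keys
-- ===== SOURCE A (Python) =====
-- def sort_node_keys(node_keys: list):
--     node_keys_input = [x for x in node_keys if "I:" in x]
--     node_keys_hidden = [x for x in node_keys if "H:" in x]
--     node_keys_output = [x for x in node_keys if "O:" in x]
--     node_keys_input.sort()
--     node_keys_hidden.sort()
--     node_keys_output.sort()
--     node_keys_sorted = node_keys_input + node_keys_hidden + node_keys_output
--     return node_keys_sorted
-- ===== SOURCE B (Python) =====
-- def _insert_sorted(xs, x):
--     # insert x into sorted xs, after any equal elements (stable)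
--     if not xs or x < xs[0]:
--         return [x] + xs
--     return [xs[0]] + _insert_sorted(xs[1:], x)
--
--
-- def sort_node_keys(node_keys: list):
--     inputs, hidden, output = [], [], []
--     for key in node_keys:
--         if "I:" in key:
--             inputs = _insert_sorted(inputs, key)
--         if "H:" in key:
--             hidden = _insert_sorted(hidden, key)
--         if "O:" in key:
--             output = _insert_sorted(output, key)
--     return inputs + hidden + output
-- ===== Notes on version B (the rewrite author's own statement) =====
-- stated objective: alternative
-- what changed: B makes a single pass over the keys, inserting each key in sorted position into whichever of three accumulator lists it matches (online insertion sort, no sort call), instead of A's three filter passes each followed by a library sort.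
import Mathlib
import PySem

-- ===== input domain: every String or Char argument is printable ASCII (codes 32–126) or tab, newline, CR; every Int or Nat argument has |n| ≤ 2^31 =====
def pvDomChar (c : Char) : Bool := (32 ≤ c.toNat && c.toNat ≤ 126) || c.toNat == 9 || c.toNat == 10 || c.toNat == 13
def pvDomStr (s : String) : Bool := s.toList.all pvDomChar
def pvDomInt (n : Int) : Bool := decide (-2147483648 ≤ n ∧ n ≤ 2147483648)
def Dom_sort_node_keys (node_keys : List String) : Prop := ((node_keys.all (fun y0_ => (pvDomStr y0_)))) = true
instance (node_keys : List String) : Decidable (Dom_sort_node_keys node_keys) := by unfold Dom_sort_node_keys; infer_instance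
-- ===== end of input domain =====

-- B replaces A's three filter passes + three library sorts by ONE pass that inserts each
-- key in sorted position into the matching accumulator list(s) (online insertion sort).

-- ===== PORT A =====
def sort_node_keys (node_keys : List String) : List String :=
  let node_keys_input := node_keys.filter (fun x => PySem.Str.isIn "I:" x)
  let node_keys_hidden := node_keys.filter (fun x => PySem.Str.isIn "H:" x)
  let node_keys_output := node_keys.filter (fun x => PySem.Str.isIn "O:" x)
  PySem.List.sorted node_keys_input (fun x => x) false
    ++ PySem.List.sorted node_keys_hidden (fun x => x) false
    ++ PySem.List.sorted node_keys_output (fun x => x) false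

-- ===== PORT B =====
-- port of Source B's _insert_sorted (recursive stable sorted insertion)
def pvInsertSorted (xs : List String) (x : String) : List String :=
  match xs with
  | [] => [x]
  | y :: ys => if x < y then x :: y :: ys else y :: pvInsertSorted ys x

-- single pass with the triple of accumulators (inputs, hidden, output)
def sort_node_keys_alt (node_keys : List String) : List String :=
  let st := node_keys.foldl
    (fun (s : List String × List String × List String) key =>
      let s1 := if PySem.Str.isIn "I:" key then (pvInsertSorted s.1 key, s.2.1, s.2.2) else s
      let s2 := if PySem.Str.isIn "H:" key then (s1.1, pvInsertSorted s1.2.1 key, s1.2.2) else s1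
      if PySem.Str.isIn "O:" key then (s2.1, s2.2.1, pvInsertSorted s2.2.2 key) else s2)
    ([], [], [])
  st.1 ++ st.2.1 ++ st.2.2

-- ===== PRECONDITION & SPEC =====
def Spec_sort_node_keys (node_keys : List String) (out : List String) : Prop := out = sort_node_keys_alt node_keys
instance (node_keys : List String) (out : List String) : Decidable (Spec_sort_node_keys node_keys out) := by unfold Spec_sort_node_keys; infer_instance

-- ===== CLAIM =====
def Claim_equal_sort_node_keys : Prop := ∀ (node_keys : List String), Dom_sort_node_keys node_keys → Spec_sort_node_keys node_keys (sort_node_keys node_keys)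

-- ===== LEMMAS AND PROOFS =====

-- conditional insertion step for one marker
def pvStep (p : String → Bool) (acc : List String) (x : String) : List String :=
  if p x then pvInsertSorted acc x else acc

-- the triple fold splits into three independent folds
theorem foldl_triple_split (xs : List String)
    (a b c : List String) :
    xs.foldl
      (fun (s : List String × List String × List String) key =>
        let s1 := if PySem.Str.isIn "I:" key then (pvInsertSorted s.1 key, s.2.1, s.2.2) else s
        let s2 := if PySem.Str.isIn "H:" key then (s1.1, pvInsertSorted s1.2.1 key, s1.2.2) else s1
        if PySem.Str.isIn "O:" key then (s2.1, s2.2.1, pvInsertSorted s2.2.2 key) else s2)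
      (a, b, c)
    = (xs.foldl (pvStep (fun x => PySem.Str.isIn "I:" x)) a,
       xs.foldl (pvStep (fun x => PySem.Str.isIn "H:" x)) b,
       xs.foldl (pvStep (fun x => PySem.Str.isIn "O:" x)) c) := by
  induction xs generalizing a b c with
  | nil => rfl
  | cons x xs ih =>
    simp only [List.foldl_cons]
    rw [← ih]
    congr 1
    simp only [pvStep]
    split_ifs <;> rfl

-- folding the conditional step = folding plain insertion over the filtered list
theorem foldl_step_eq_filter (p : String → Bool) (xs : List String) (acc : List String) :
    xs.foldl (pvStep p) acc = (xs.filter p).foldl pvInsertSorted acc := by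
  induction xs generalizing acc with
  | nil => rfl
  | cons x xs ih =>
    simp only [List.foldl_cons, List.filter_cons, pvStep]
    by_cases h : p x <;> simp [h, ih]

theorem mem_pvInsertSorted (xs : List String) (x z : String) :
    z ∈ pvInsertSorted xs x ↔ z = x ∨ z ∈ xs := by
  induction xs with
  | nil => simp [pvInsertSorted]
  | cons y ys ih =>
    simp only [pvInsertSorted]
    split_ifs <;> simp [ih] <;> tauto

theorem pvInsertSorted_perm (xs : List String) (x : String) :
    (pvInsertSorted xs x).Perm (x :: xs) := by
  induction xs with
  | nil => simp [pvInsertSorted]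
  | cons y ys ih =>
    simp only [pvInsertSorted]
    split_ifs
    · exact List.Perm.refl _
    · exact (ih.cons y).trans (List.Perm.swap x y ys)

theorem pvInsertSorted_pairwise (xs : List String) (x : String)
    (h : xs.Pairwise (· ≤ ·)) : (pvInsertSorted xs x).Pairwise (· ≤ ·) := by
  induction xs with
  | nil => simp [pvInsertSorted]
  | cons y ys ih =>
    simp only [pvInsertSorted]
    rcases (List.pairwise_cons.mp h) with ⟨hy, hys⟩
    split_ifs with hlt
    · refine List.pairwise_cons.mpr ⟨?_, h⟩
      intro z hz
      rcases List.mem_cons.mp hz with rfl | hz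
      · exact le_of_lt hlt
      · exact le_trans (le_of_lt hlt) (hy z hz)
    · refine List.pairwise_cons.mpr ⟨?_, ih hys⟩
      intro z hz
      rcases (mem_pvInsertSorted ys x z).mp hz with rfl | hz
      · exact le_of_not_gt (by simpa using hlt)
      · exact hy z hz

theorem foldl_insert_perm (xs acc : List String) :
    (xs.foldl pvInsertSorted acc).Perm (acc ++ xs) := by
  induction xs generalizing acc with
  | nil => simp
  | cons x xs ih =>
    simp only [List.foldl_cons]
    refine (ih (pvInsertSorted acc x)).trans ?_
    exact ((pvInsertSorted_perm acc x).append_right xs).trans List.perm_middle.symm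

theorem foldl_insert_pairwise (xs acc : List String)
    (h : acc.Pairwise (· ≤ ·)) : (xs.foldl pvInsertSorted acc).Pairwise (· ≤ ·) := by
  induction xs generalizing acc with
  | nil => exact h
  | cons x xs ih => exact ih _ (pvInsertSorted_pairwise acc x h)

-- the insertion sort equals PySem's sort
theorem foldl_insert_eq_sorted (xs : List String) :
    PySem.List.sorted xs (fun x => x) false = xs.foldl pvInsertSorted [] := by
  apply PySem.List.sorted_id_eq_of_perm_of_pairwise
  · simpa using foldl_insert_perm xs []
  · exact foldl_insert_pairwise xs [] (by simp)

-- ===== VERDICT =====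
theorem sort_node_keys_spec : Claim_equal_sort_node_keys := by
  intro node_keys _
  unfold Spec_sort_node_keys sort_node_keys sort_node_keys_alt
  rw [foldl_triple_split]
  simp only [foldl_step_eq_filter, foldl_insert_eq_sorted]
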